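-- pv_equiv track=rewrite | github.com/alex-aparin/Puzzles | HackerRank/Algorithms/Search/hackerland-radio-transmitters.py | put_radio
-- ===== SOURCE A (Python) =====
-- def put_radio(n, k, xs, i):
--     j = i
--     while j < n and xs[j] - xs[i] <= k:
--         j = j + 1
--     i = j - 1
--     while j < n and xs[j] - xs[i] <= k:
--         j = j + 1
--     return j
-- ===== SOURCE B (Python) =====
-- def _bisect_gt(xs, t, lo, hi):
--     # first index in [lo, hi) whose value exceeds t (xs sorted on that window)
--     while lo < hi:
--         mid = (lo + hi) // 2
--         if xs[mid] <= t:
--             lo = mid + 1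
--         else:
--             hi = mid
--     return lo
--
-- def put_radio(n, k, xs, i):
--     if i >= n:
--         return i
--     j = _bisect_gt(xs, xs[i] + k, i, n)
--     return _bisect_gt(xs, xs[j - 1] + k, j, n)
-- ===== Notes on version B (the rewrite author's own statement) =====
-- stated objective: alternative
-- what changed: Each of A's two linear window scans is replaced by a binary search (bisect_right-style) over the sorted coordinate window, after an early return when i >= n.
-- outside the precondition, e.g. on put_radio(5, 2, [-1, 0, 1, 4, 0], 2): A returns 3, B returns 5; on put_radio(2, 2, [-2, 4], -2): A returns -1, B returns 1; on put_radio(5, 1, [1, 2], 0): A raises IndexError, B raises IndexError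
import Mathlib
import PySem

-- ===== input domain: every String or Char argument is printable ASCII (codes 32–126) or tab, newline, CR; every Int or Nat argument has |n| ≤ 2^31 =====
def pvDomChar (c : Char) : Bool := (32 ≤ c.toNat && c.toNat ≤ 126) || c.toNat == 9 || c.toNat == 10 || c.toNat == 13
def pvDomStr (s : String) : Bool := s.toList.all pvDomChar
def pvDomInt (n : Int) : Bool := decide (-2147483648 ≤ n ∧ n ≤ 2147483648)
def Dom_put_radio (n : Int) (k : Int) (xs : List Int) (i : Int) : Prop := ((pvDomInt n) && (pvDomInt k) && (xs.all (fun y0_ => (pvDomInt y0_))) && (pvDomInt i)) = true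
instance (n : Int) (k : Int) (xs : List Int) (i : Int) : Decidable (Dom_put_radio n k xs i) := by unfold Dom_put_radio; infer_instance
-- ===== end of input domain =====

-- B replaces A's two linear window scans by binary searches on the sorted coordinate list (alternative algorithm).


-- ===== PORT A =====
-- while j < n and xs[j] - xs[b] <= k: j = j + 1   (b is the fixed base index of the scan)
def putRadioScan (n : Int) (k : Int) (xs : List Int) (b : Int) (j : Int) : Int :=
  if _h : j < n ∧ PySem.List.pyGetD xs j 0 - PySem.List.pyGetD xs b 0 ≤ k then
    putRadioScan n k xs b (j + 1)
  else j
termination_by (n - j).toNat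
decreasing_by omega

def put_radio (n : Int) (k : Int) (xs : List Int) (i : Int) : Int :=
  let j := putRadioScan n k xs i i
  -- i = j - 1; second scan from the same j
  putRadioScan n k xs (j - 1) j

-- ===== PORT B =====
-- first index in [lo, hi) whose value exceeds t (xs sorted on that window); transliteration of _bisect_gt in Source B
def bisectGt (xs : List Int) (t : Int) (lo : Int) (hi : Int) : Int :=
  if _h : lo < hi then
    let mid := PySem.Int.floordiv (lo + hi) 2
    if PySem.List.pyGetD xs mid 0 ≤ t then bisectGt xs t (mid + 1) hi
    else bisectGt xs t lo mid
  else lo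
termination_by (hi - lo).toNat
decreasing_by
  · have h1 := PySem.Int.floordiv_two_mid_bounds (lo := lo) (hi := hi) (by omega)
    omega
  · have h2 : PySem.Int.floordiv (lo + hi) 2 < hi :=
      (PySem.Int.floordiv_lt_iff_lt_mul (by omega)).mpr (by omega)
    omega

def put_radio_alt (n : Int) (k : Int) (xs : List Int) (i : Int) : Int :=
  if i ≥ n then i
  else
    let j := bisectGt xs (PySem.List.pyGetD xs i 0 + k) i n
    bisectGt xs (PySem.List.pyGetD xs (j - 1) 0 + k) j n

-- ===== PRECONDITION & SPEC =====
-- Pre_ admits any input with n ≤ i (both programs return i at once, touching no index) and otherwise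
-- excludes: negative i (Python negative-index wraparound, on which B's binary search window is
-- degenerate and may read other wrapped indices or raise), n greater than len(xs) (A indexes past the
-- list and may raise IndexError), and unsorted xs (the function's documented input is a sorted
-- coordinate list; on unsorted data a linear scan and a binary search legitimately diverge).
def Pre_put_radio (n : Int) (k : Int) (xs : List Int) (i : Int) : Prop :=
  n ≤ i ∨ (0 ≤ i ∧ n ≤ xs.length ∧ List.Pairwise (· ≤ ·) xs)
instance (n : Int) (k : Int) (xs : List Int) (i : Int) : Decidable (Pre_put_radio n k xs i) := by
  unfold Pre_put_radio; infer_instance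
def pvWitness_put_radio : Int × Int × List Int × Int := (3, 1, [1, 2, 5], 0)

def Spec_put_radio (n : Int) (k : Int) (xs : List Int) (i : Int) (out : Int) : Prop := out = put_radio_alt n k xs i
instance (n : Int) (k : Int) (xs : List Int) (i : Int) (out : Int) : Decidable (Spec_put_radio n k xs i out) := by unfold Spec_put_radio; infer_instance

-- ===== CLAIM (what is proved, stated in full; the proofs are below) =====
def Claim_equal_put_radio : Prop := ∀ (n : Int) (k : Int) (xs : List Int) (i : Int), Dom_put_radio n k xs i → Pre_put_radio n k xs i → Spec_put_radio n k xs i (put_radio n k xs i)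

-- ===== LEMMAS AND PROOFS =====

-- sorted list: values are monotone in the (in-range, nonnegative) index
lemma pyGetD_mono (xs : List Int) (hs : List.Pairwise (· ≤ ·) xs)
    (a b : Int) (h0 : 0 ≤ a) (hab : a ≤ b) (hb : b < xs.length) :
    PySem.List.pyGetD xs a 0 ≤ PySem.List.pyGetD xs b 0 := by
  rw [PySem.List.pyGetD_eq_getElem xs (i := a) 0 h0 (by omega),
      PySem.List.pyGetD_eq_getElem xs (i := b) 0 (by omega) hb]
  rcases eq_or_lt_of_le hab with h | h
  · simp [h]
  · exact (List.pairwise_iff_getElem.mp hs) a.toNat b.toNat (by omega) (by omega) (by omega)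

-- characterization of A's scan
lemma putRadioScan_char (n k : Int) (xs : List Int) (b lo : Int)
    (h0 : 0 ≤ lo) (hln : lo ≤ n) :
    lo ≤ putRadioScan n k xs b lo ∧ putRadioScan n k xs b lo ≤ n ∧
    (∀ m : Int, lo ≤ m → m < putRadioScan n k xs b lo →
        PySem.List.pyGetD xs m 0 ≤ PySem.List.pyGetD xs b 0 + k) ∧
    (putRadioScan n k xs b lo < n →
        PySem.List.pyGetD xs b 0 + k < PySem.List.pyGetD xs (putRadioScan n k xs b lo) 0) := by
  induction lo using putRadioScan.induct (n := n) (k := k) (xs := xs) (b := b) with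
  | case1 j h ih =>
    rw [putRadioScan, dif_pos h]
    obtain ⟨ih1, ih2, ih3, ih4⟩ := ih (by omega) (by omega)
    refine ⟨by omega, ih2, ?_, ih4⟩
    intro m hm1 hm2
    rcases eq_or_lt_of_le hm1 with hEq | hLt
    · subst hEq; omega
    · exact ih3 m (by omega) hm2
  | case2 j h =>
    rw [putRadioScan, dif_neg h]
    refine ⟨le_refl _, hln, by omega, ?_⟩
    intro hjn
    rcases not_and_or.mp h with h' | h'
    · omega
    · omega

-- characterization of B's binary search (needs the window sorted)
lemma bisectGt_char (xs : List Int) (hs : List.Pairwise (· ≤ ·) xs) (t lo hi : Int)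
    (h0 : 0 ≤ lo) (hlh : lo ≤ hi) (hhi : hi ≤ xs.length) :
    lo ≤ bisectGt xs t lo hi ∧ bisectGt xs t lo hi ≤ hi ∧
    (∀ m : Int, lo ≤ m → m < bisectGt xs t lo hi → PySem.List.pyGetD xs m 0 ≤ t) ∧
    (∀ m : Int, bisectGt xs t lo hi ≤ m → m < hi → t < PySem.List.pyGetD xs m 0) := by
  induction lo, hi using bisectGt.induct (xs := xs) (t := t) with
  | case1 lo hi h mid hle ih =>
    have hmid := PySem.Int.floordiv_two_mid_bounds (lo := lo) (hi := hi) (by omega)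
    have hmidlt : PySem.Int.floordiv (lo + hi) 2 < hi :=
      (PySem.Int.floordiv_lt_iff_lt_mul (by omega)).mpr (by omega)
    rw [bisectGt, dif_pos h, if_pos hle]
    obtain ⟨ih1, ih2, ih3, ih4⟩ := ih (by simp only [mid] at *; omega) (by simp only [mid] at *; omega) hhi
    refine ⟨by simp only [mid] at *; omega, ih2, ?_, ih4⟩
    intro m hm1 hm2
    by_cases hcase : mid + 1 ≤ m
    · exact ih3 m hcase hm2
    · -- lo ≤ m ≤ mid: use monotonicity up to mid
      have : PySem.List.pyGetD xs m 0 ≤ PySem.List.pyGetD xs mid 0 :=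
        pyGetD_mono xs hs m mid (by omega) (by omega) (by simp only [mid] at *; omega)
      omega
  | case2 lo hi h mid hgt ih =>
    have hmid := PySem.Int.floordiv_two_mid_bounds (lo := lo) (hi := hi) (by omega)
    have hmidlt : PySem.Int.floordiv (lo + hi) 2 < hi :=
      (PySem.Int.floordiv_lt_iff_lt_mul (by omega)).mpr (by omega)
    rw [bisectGt, dif_pos h, if_neg hgt]
    obtain ⟨ih1, ih2, ih3, ih4⟩ := ih h0 (by simp only [mid] at *; omega) (by omega)
    refine ⟨ih1, by simp only [mid] at *; omega, ih3, ?_⟩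
    intro m hm1 hm2
    by_cases hcase : m < mid
    · exact ih4 m hm1 hcase
    · -- mid ≤ m < hi: value ≥ value at mid > t
      have : PySem.List.pyGetD xs mid 0 ≤ PySem.List.pyGetD xs m 0 :=
        pyGetD_mono xs hs mid m (by simp only [mid] at *; omega) (by omega) (by omega)
      simp only [mid] at *; omega
  | case3 lo hi h =>
    rw [bisectGt, dif_neg h]
    exact ⟨le_refl _, by omega, by omega, by omega⟩

-- on a sorted list the scan and the binary search agree
lemma scan_eq_bisectGt (n k : Int) (xs : List Int) (hs : List.Pairwise (· ≤ ·) xs)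
    (b lo : Int) (h0 : 0 ≤ lo) (hln : lo ≤ n) (hn : n ≤ xs.length) :
    putRadioScan n k xs b lo = bisectGt xs (PySem.List.pyGetD xs b 0 + k) lo n := by
  set t := PySem.List.pyGetD xs b 0 + k with ht
  obtain ⟨a1, a2, a3, a4⟩ := putRadioScan_char n k xs b lo h0 hln
  obtain ⟨b1, b2, b3, b4⟩ := bisectGt_char xs hs t lo n h0 hln hn
  set rA := putRadioScan n k xs b lo
  set rB := bisectGt xs t lo n
  rcases lt_trichotomy rA rB with h | h | h
  · -- xs[rA] ≤ t (from B's lower part) but t < xs[rA] (from A, rA < rB ≤ n)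
    have h1 := b3 rA a1 h
    have h2 := a4 (by omega)
    omega
  · exact h
  · have h1 := a3 rB b1 h
    have h2 := b4 rB (le_refl _) (by omega)
    omega

-- ===== VERDICT (by name: the statement is the Claim_ definition above) =====
theorem put_radio_spec : Claim_equal_put_radio := by
  intro n k xs i _hDom hPre
  unfold Spec_put_radio put_radio put_radio_alt
  by_cases hcase : i ≥ n
  · -- first scan: condition is false at once, j = i; second scan the same
    have hj : putRadioScan n k xs i i = i := by
      rw [putRadioScan, dif_neg (by omega)]
    rw [hj, putRadioScan, dif_neg (by omega), if_pos hcase]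
  · obtain ⟨hi0, hn, hs⟩ := hPre.resolve_left (by omega)
    rw [if_neg hcase]
    have h1 := scan_eq_bisectGt n k xs hs i i hi0 (by omega : i ≤ n) hn
    obtain ⟨a1, a2, -, -⟩ := putRadioScan_char n k xs i i hi0 (by omega : i ≤ n)
    have hr0 : (0:Int) ≤ putRadioScan n k xs i i := by omega
    have h2 := scan_eq_bisectGt n k xs hs (putRadioScan n k xs i i - 1)
      (putRadioScan n k xs i i) hr0 a2 hn
    rw [← h1]
    exact h2
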